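-- pv_equiv track=rewrite | github.com/lagercarvalho/adventOfCode | 2023/day3.py | getSurroundNums
-- ===== SOURCE A (Python) =====
-- def getSurroundNums(input, line_index, char_index):
--   numbers = []
--   lastNum = -1
--   for row in range(line_index - 1, line_index + 2):
--     if row < 0 or row >= len(input): continue
--     for col in range(char_index - 1, char_index + 2):
--       if col < 0 or col >= len(input[line_index]): continue
--       if input[row][col].isdigit() and lastNum == -1:
--         numbers.append(getNum(input,row,col))
--         lastNum = col
--       elif not input[row][col].isdigit():
--         lastNum = -1
--     lastNum = -1
--   return numbers
--
-- def getNum(input, row, col):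
--   num = []
--   num.append(input[row][col])
--   num = getDigits(input, row, col, -1) + num
--   num = num + getDigits(input, row, col, 1)
--   return(int(''.join(num)))
--
-- def getDigits(input, row, col, step):
--   num = []
--   col = col + step
--   if col < 0 or col >= len(input[row]):
--     return []
--   elif input[row][col].isdigit():
--     num.append(input[row][col])
--     if step == -1:
--       num = getDigits(input, row, col, -1) + num
--     else:
--       num = num + getDigits(input, row, col, 1)
--   return num
-- ===== SOURCE B (Python) =====
-- def getSurroundNums(input, line_index, char_index):
--   # Span-based rewrite: scan each neighbouring row once, extract maximal
--   # digit spans, and keep those overlapping the 3-wide column window.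
--   rows = range(max(line_index - 1, 0), min(line_index + 2, len(input)))
--   if len(rows) == 0:
--     return []
--   width = len(input[line_index])
--   lo = max(char_index - 1, 0)
--   hi = min(char_index + 1, width - 1)
--   if lo > hi:
--     return []
--   result = []
--   for row in rows:
--     line = input[row]
--     j = 0
--     while j < len(line):
--       if line[j].isdigit():
--         s = j
--         while j < len(line) and line[j].isdigit():
--           j += 1
--         if s <= hi and j - 1 >= lo:
--           result.append(int(line[s:j]))
--       else:
--         j += 1
--   return result
-- ===== Notes on version B (the rewrite author's own statement) =====
-- stated objective: alternative
-- what changed: A scans the 3x3 neighbourhood cell by cell with a lastNum run-tracking state machine and re-expands each hit recursively left and right; B instead extracts each neighbouring row's maximal digit spans in one left-to-right pass and emits the value of every span whose column interval overlaps the 3-wide window, so no per-cell state or recursive expansion remains.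
-- outside the precondition, e.g. on getSurroundNums(['0', '3'], -1, -1): A returns [0], B returns [0]; on getSurroundNums(['1', '3*', ''], 3, -2): A returns [], B raises IndexError
import Mathlib
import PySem

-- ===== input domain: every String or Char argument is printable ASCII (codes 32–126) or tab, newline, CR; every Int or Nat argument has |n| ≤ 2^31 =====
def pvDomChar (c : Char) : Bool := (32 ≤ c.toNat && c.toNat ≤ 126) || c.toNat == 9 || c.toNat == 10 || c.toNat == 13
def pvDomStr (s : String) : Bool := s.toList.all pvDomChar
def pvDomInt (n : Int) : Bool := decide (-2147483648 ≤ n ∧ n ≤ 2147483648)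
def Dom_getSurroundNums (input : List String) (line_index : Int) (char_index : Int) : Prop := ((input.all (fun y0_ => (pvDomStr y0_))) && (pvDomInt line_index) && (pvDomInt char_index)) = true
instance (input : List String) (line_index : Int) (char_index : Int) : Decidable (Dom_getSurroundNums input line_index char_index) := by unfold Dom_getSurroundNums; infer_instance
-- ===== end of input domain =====

-- B replaces A's per-cell lastNum state machine and recursive digit expansion by a single
-- left-to-right extraction of maximal digit spans per neighbouring row (objective: alternative).

-- ===== PORT A =====
-- input[r] as a character list (empty only where Python would raise, excluded by Pre_)
def pvLine (input : List String) (r : Int) : List Char :=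
  ((PySem.List.pyGet? input r).getD "").toList

-- getDigits(input, row, col, -1), on the selected row's characters
def getDigitsL (ln : List Char) (col : Int) : List Char :=
  if h : col - 1 < 0 ∨ (ln.length : Int) ≤ col - 1 then []
  else
    let ch := (PySem.List.pyGet? ln (col - 1)).getD ' '
    if PySem.Chars.isdigit ch then getDigitsL ln (col - 1) ++ [ch] else []
termination_by col.toNat
decreasing_by simp only [not_or, not_lt] at h; omega

-- getDigits(input, row, col, 1)
def getDigitsR (ln : List Char) (col : Int) : List Char :=
  if h : col + 1 < 0 ∨ (ln.length : Int) ≤ col + 1 then []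
  else
    let ch := (PySem.List.pyGet? ln (col + 1)).getD ' '
    if PySem.Chars.isdigit ch then ch :: getDigitsR ln (col + 1) else []
termination_by ((ln.length : Int) - col).toNat
decreasing_by simp only [not_or, not_lt] at h; omega

def getNum (input : List String) (row : Int) (col : Int) : Int :=
  let ln := pvLine input row
  let num0 := [(PySem.List.pyGet? ln col).getD ' ']
  let num1 := getDigitsL ln col ++ num0
  let num2 := num1 ++ getDigitsR ln col
  (PySem.Int.ofChars? num2).getD 0

-- body of A's inner `for col in range(...)` loop; state = (numbers, lastNum)
def colStep (input : List String) (line_index row : Int)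
    (st : List Int × Int) (col : Int) : List Int × Int :=
  if col < 0 ∨ ((pvLine input line_index).length : Int) ≤ col then st
  else
    let ch := (PySem.List.pyGet? (pvLine input row) col).getD ' '
    if PySem.Chars.isdigit ch ∧ st.2 = -1 then (st.1 ++ [getNum input row col], col)
    else if ¬ (PySem.Chars.isdigit ch) then (st.1, -1)
    else st

-- body of A's outer `for row in range(...)` loop
def rowStep (input : List String) (line_index char_index : Int)
    (st : List Int × Int) (row : Int) : List Int × Int :=
  if row < 0 ∨ (input.length : Int) ≤ row then st
  else
    let st2 := (PySem.List.pyRange (char_index - 1) (char_index + 2) 1).foldl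
      (colStep input line_index row) st
    (st2.1, -1)

def getSurroundNums (input : List String) (line_index : Int) (char_index : Int) : List Int :=
  ((PySem.List.pyRange (line_index - 1) (line_index + 2) 1).foldl
    (rowStep input line_index char_index) ([], -1)).1

-- ===== PORT B =====
-- B's inner `while j < len(line) and line[j].isdigit(): j += 1`
def pvAdvance (ln : List Char) (j : Nat) : Nat :=
  if h : j < ln.length then
    if PySem.Chars.isdigit ln[j] then pvAdvance ln (j + 1) else j
  else j
termination_by ln.length - j

-- cited by rowNums' decreasing_by
theorem le_pvAdvance (ln : List Char) (j : Nat) : j ≤ pvAdvance ln j := by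
  unfold pvAdvance
  split
  · split
    · have := le_pvAdvance ln (j + 1); omega
    · exact le_refl j
  · exact le_refl j
termination_by ln.length - j

-- B's outer `while j < len(line)` loop: emit each overlapping maximal span's value
def rowNums (ln : List Char) (lo hi : Int) (j : Nat) : List Int :=
  if h : j < ln.length then
    if PySem.Chars.isdigit ln[j] then
      let e := pvAdvance ln (j + 1)
      (if (j : Int) ≤ hi ∧ lo ≤ (e : Int) - 1 then
        [(PySem.Int.ofChars? (PySem.List.slice ln (some (j : Int)) (some (e : Int)))).getD 0]
       else []) ++ rowNums ln lo hi e
    else rowNums ln lo hi (j + 1)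
  else []
termination_by ln.length - j
decreasing_by
  · have h1 := le_pvAdvance ln (j + 1); omega
  · omega

def getSurroundNums_alt (input : List String) (line_index : Int) (char_index : Int) : List Int :=
  let L : Int := (input.length : Int)
  let rlo : Int := max (line_index - 1) 0
  let rhi : Int := min (line_index + 2) L
  if rhi ≤ rlo then []
  else
    let width : Int := ((pvLine input line_index).length : Int)
    let lo : Int := max (char_index - 1) 0
    let hi : Int := min (char_index + 1) (width - 1)
    if hi < lo then []
    else
      (PySem.List.pyRange rlo rhi 1).foldl
        (fun acc row => acc ++ rowNums (pvLine input row) lo hi 0) []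

-- ===== PRECONDITION & SPEC =====
-- Pre_ excludes the inputs where A raises IndexError (line_index = len(input) with a cell in
-- reach, or a ragged neighbour row shorter than the scanned window), and the accidental
-- returns A only produces through negative-index wraparound (line_index = -1) or boolean
-- short-circuiting (window entirely at negative columns with an out-of-range line_index);
-- B naturally raises IndexError on the latter inputs.
def Pre_getSurroundNums (input : List String) (line_index : Int) (char_index : Int) : Prop :=
  (line_index < -1 ∨ (input.length : Int) < line_index ∨ input = []) ∨
  (0 ≤ line_index ∧ line_index < (input.length : Int) ∧
    ∀ r ∈ [line_index - 1, line_index, line_index + 1], 0 ≤ r → r < (input.length : Int) →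
      ∀ c ∈ [char_index - 1, char_index, char_index + 1],
        0 ≤ c → c < ((pvLine input line_index).length : Int) →
          c < ((pvLine input r).length : Int))
instance (input : List String) (line_index : Int) (char_index : Int) : Decidable (Pre_getSurroundNums input line_index char_index) := by unfold Pre_getSurroundNums; infer_instance

def pvWitness_getSurroundNums : List String × Int × Int := (["*1*", "22.", "..3"], 1, 1)

def Spec_getSurroundNums (input : List String) (line_index : Int) (char_index : Int) (out : List Int) : Prop := out = getSurroundNums_alt input line_index char_index
instance (input : List String) (line_index : Int) (char_index : Int) (out : List Int) : Decidable (Spec_getSurroundNums input line_index char_index out) := by unfold Spec_getSurroundNums; infer_instance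

-- ===== CLAIM (what is proved, stated in full; the proofs are below) =====
def Claim_equal_getSurroundNums : Prop := ∀ (input : List String) (line_index : Int) (char_index : Int), Dom_getSurroundNums input line_index char_index → Pre_getSurroundNums input line_index char_index → Spec_getSurroundNums input line_index char_index (getSurroundNums input line_index char_index)

-- ===== LEMMAS AND PROOFS =====

def digAt (cs : List Char) (j : Nat) : Bool := PySem.Chars.isdigit (cs.getD j ' ')

theorem digAt_oob (cs : List Char) (j : Nat) (h : cs.length ≤ j) : digAt cs j = false := by
  unfold digAt
  rw [List.getD_eq_getElem?_getD, List.getElem?_eq_none (by omega)]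
  decide

theorem digAt_lt (cs : List Char) (j : Nat) (h : j < cs.length) :
    digAt cs j = PySem.Chars.isdigit cs[j] := by
  unfold digAt
  rw [List.getD_eq_getElem?_getD, List.getElem?_eq_getElem h]
  rfl

theorem pvAdvance_digits (cs : List Char) (j : Nat) :
    ∀ m, j ≤ m → m < pvAdvance cs j → digAt cs m = true := by
  intro m h1 h2
  unfold pvAdvance at h2
  split at h2
  · rename_i hlen
    split at h2
    · rename_i hd
      rcases Nat.eq_or_lt_of_le h1 with rfl | hlt
      · rw [digAt_lt _ _ hlen]; exact hd
      · exact pvAdvance_digits cs (j + 1) m hlt h2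
    · omega
  · omega
termination_by cs.length - j
decreasing_by rename_i hlen _; omega

theorem pvAdvance_stop (cs : List Char) (j : Nat) :
    pvAdvance cs j < cs.length → digAt cs (pvAdvance cs j) = false := by
  unfold pvAdvance
  split
  · rename_i hlen
    split
    · exact pvAdvance_stop cs (j + 1)
    · rename_i hd
      intro _
      rw [digAt_lt _ _ hlen]
      simpa using hd
  · intro h; omega
termination_by cs.length - j

theorem pyGetD_at (cs : List Char) (i : Nat) (h : i < cs.length) :
    (PySem.List.pyGet? cs (i : Int)).getD ' ' = cs[i] := by
  rw [PySem.List.pyGet?_natCast, List.getElem?_eq_getElem h]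
  rfl

theorem getDigitsL_run (cs : List Char) (k m : Nat) (hkm : k ≤ m) (hm : m < cs.length)
    (hrun : ∀ i, k ≤ i → i ≤ m → digAt cs i = true)
    (hleft : k = 0 ∨ digAt cs (k - 1) = false) :
    getDigitsL cs (m : Int) = (cs.drop k).take (m - k) := by
  rcases Nat.eq_or_lt_of_le hkm with rfl | hlt
  · -- m = k
    rcases Nat.eq_zero_or_pos k with rfl | hk0
    · unfold getDigitsL
      rw [dif_pos (by omega)]
      simp
    · have hnd : digAt cs (k - 1) = false := by
        rcases hleft with h | h
        · omega
        · exact h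
      unfold getDigitsL
      rw [dif_neg (by omega)]
      have hcast : (k : Int) - 1 = ((k - 1 : Nat) : Int) := by omega
      rw [hcast, pyGetD_at cs (k - 1) (by omega)]
      rw [if_neg]
      · simp
      · rw [← digAt_lt cs (k - 1) (by omega)]
        simp [hnd]
  · -- m > k
    unfold getDigitsL
    rw [dif_neg (by omega)]
    have hcast : (m : Int) - 1 = ((m - 1 : Nat) : Int) := by omega
    rw [hcast, pyGetD_at cs (m - 1) (by omega)]
    rw [if_pos]
    · rw [getDigitsL_run cs k (m - 1) (by omega) (by omega)
        (fun i h1 h2 => hrun i h1 (by omega)) hleft]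
      have : m - k = (m - 1 - k) + 1 := by omega
      rw [this, List.take_succ]
      have hidx : (cs.drop k)[m - 1 - k]? = some cs[m - 1] := by
        rw [List.getElem?_drop]
        have h2 : k + (m - 1 - k) = m - 1 := by omega
        rw [h2, List.getElem?_eq_getElem (by omega)]
      rw [hidx]
      rfl
    · rw [← digAt_lt cs (m - 1) (by omega)]
      exact hrun (m - 1) (by omega) (by omega)
termination_by m
decreasing_by omega

theorem getDigitsR_run (cs : List Char) (e : Nat) (he : e ≤ cs.length)
    (hstop : digAt cs e = false) :
    ∀ m : Nat, m < e → (∀ i, m ≤ i → i < e → digAt cs i = true) →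
    getDigitsR cs (m : Int) = (cs.drop (m + 1)).take (e - m - 1) := by
  intro m hme hrun
  by_cases hc : m + 1 = e
  · unfold getDigitsR
    rcases Nat.eq_or_lt_of_le he with rfl | helt
    · rw [dif_pos (by omega)]
      have hd : cs.drop (m + 1) = [] := List.drop_of_length_le (by omega)
      simp [hd]
    · rw [dif_neg (by omega)]
      have hcast : (m : Int) + 1 = ((m + 1 : Nat) : Int) := by omega
      rw [hcast, pyGetD_at cs (m + 1) (by omega)]
      rw [if_neg]
      · have h0 : e - m - 1 = 0 := by omega
        simp [h0]
      · rw [← digAt_lt cs (m + 1) (by omega), hc]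
        simp [hstop]
  · have hm1e : m + 1 < e := by omega
    unfold getDigitsR
    rw [dif_neg (by omega)]
    have hcast : (m : Int) + 1 = ((m + 1 : Nat) : Int) := by omega
    rw [hcast, pyGetD_at cs (m + 1) (by omega)]
    rw [if_pos]
    · rw [getDigitsR_run cs e he hstop (m + 1) (by omega)
        (fun i h1 h2 => hrun i (by omega) h2)]
      rw [List.drop_eq_getElem_cons (show m + 1 < cs.length by omega)]
      have h3 : e - m - 1 = (e - (m + 1) - 1) + 1 := by omega
      rw [h3, List.take_succ_cons]
    · rw [← digAt_lt cs (m + 1) (by omega)]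
      exact hrun (m + 1) (by omega) (by omega)
termination_by m _ _ => e - m

def numAt (cs : List Char) (j : Nat) : Int :=
  (PySem.Int.ofChars? (getDigitsL cs (j : Int) ++ [cs.getD j ' '] ++ getDigitsR cs (j : Int))).getD 0

theorem numAt_eq_slice (cs : List Char) (k m e : Nat) (hkm : k ≤ m) (hme : m < e)
    (he : e ≤ cs.length) (hrun : ∀ i, k ≤ i → i < e → digAt cs i = true)
    (hl : k = 0 ∨ digAt cs (k - 1) = false) (hr : digAt cs e = false) :
    numAt cs m = (PySem.Int.ofChars? (PySem.List.slice cs (some (k : Int)) (some (e : Int)))).getD 0 := by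
  have hs : PySem.List.slice cs (some (k : Int)) (some (e : Int))
      = (cs.drop k).take (e - k) := by
    rw [PySem.List.slice_toNat cs (by omega) (by omega)]
    simp
  rw [hs]
  unfold numAt
  rw [getDigitsL_run cs k m hkm (by omega) (fun i h1 h2 => hrun i h1 (by omega)) hl]
  rw [getDigitsR_run cs e he hr m hme (fun i h1 h2 => hrun i (by omega) h2)]
  have hgd : cs.getD m ' ' = cs[m] := by
    rw [List.getD_eq_getElem?_getD, List.getElem?_eq_getElem (by omega)]
    rfl
  rw [hgd]
  have hsplit : e - k = (m - k) + (e - m) := by omega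
  have hR : (cs.drop k).take (e - k)
      = (cs.drop k).take (m - k) ++ cs[m] :: (cs.drop (m + 1)).take (e - m - 1) := by
    rw [hsplit, List.take_add, List.drop_drop]
    have h2 : k + (m - k) = m := by omega
    rw [h2]
    rw [List.drop_eq_getElem_cons (show m < cs.length by omega)]
    have h3 : e - m = (e - m - 1) + 1 := by omega
    rw [h3, List.take_succ_cons]
    simp
  rw [hR]
  simp

def repF (cs : List Char) (lo' : Nat) (j : Nat) : Option Int :=
  if digAt cs j = true ∧ (j = lo' ∨ digAt cs (j - 1) = false) then some (numAt cs j) else none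

def repsFrom (cs : List Char) (lo' hi' m : Nat) : List Int :=
  (List.range' m (hi' + 1 - m)).filterMap (repF cs lo')

theorem repsFrom_oob (cs : List Char) (lo' hi' m : Nat) (h : hi' < m) :
    repsFrom cs lo' hi' m = [] := by
  unfold repsFrom
  have : hi' + 1 - m = 0 := by omega
  rw [this]
  rfl

theorem repsFrom_cons (cs : List Char) (lo' hi' m : Nat) (h : m ≤ hi') :
    repsFrom cs lo' hi' m = (repF cs lo' m).toList ++ repsFrom cs lo' hi' (m + 1) := by
  unfold repsFrom
  have h1 : hi' + 1 - m = (hi' - m) + 1 := by omega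
  have h2 : hi' + 1 - (m + 1) = hi' - m := by omega
  rw [h1, h2, List.range'_succ, List.filterMap_cons]
  cases hrep : repF cs lo' m <;> simp

theorem repsFrom_skip (cs : List Char) (lo' hi' : Nat) :
    ∀ a b : Nat, a ≤ b → (∀ j, a ≤ j → j < b → repF cs lo' j = none) →
    repsFrom cs lo' hi' a = repsFrom cs lo' hi' b := by
  intro a b hab hnone
  rcases Nat.eq_or_lt_of_le hab with rfl | hlt
  · rfl
  · by_cases hh : hi' < a
    · rw [repsFrom_oob cs lo' hi' a hh, repsFrom_oob cs lo' hi' b (by omega)]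
    · rw [repsFrom_cons cs lo' hi' a (by omega), hnone a (le_refl a) hlt]
      simpa using repsFrom_skip cs lo' hi' (a + 1) b (by omega)
        (fun j h1 h2 => hnone j (by omega) h2)
termination_by a b => b - a

theorem pvAdvance_le2 (cs : List Char) (j : Nat) (h : j ≤ cs.length) :
    pvAdvance cs j ≤ cs.length := by
  unfold pvAdvance
  split
  · split
    · exact pvAdvance_le2 cs (j + 1) (by omega)
    · exact h
  · exact h
termination_by cs.length - j

theorem rowNums_eq (cs : List Char) (lo hi : Int) (lo' hi' : Nat) (hl : lo = (lo' : Int))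
    (hh : hi = (hi' : Int)) (hwin : lo' ≤ hi') (hb : hi' < cs.length)
    (k : Nat) (hinv : k = 0 ∨ digAt cs (k - 1) = false ∨ digAt cs k = false ∨ cs.length ≤ k) :
    rowNums cs lo hi k = repsFrom cs lo' hi' (max lo' k) := by
  subst hl; subst hh
  by_cases hk : k < cs.length
  · by_cases hd : PySem.Chars.isdigit cs[k]
    · have hdig : digAt cs k = true := by rw [digAt_lt _ _ hk]; exact hd
      have hke : k + 1 ≤ pvAdvance cs (k + 1) := le_pvAdvance cs (k + 1)
      have helen : pvAdvance cs (k + 1) ≤ cs.length := pvAdvance_le2 cs (k + 1) (by omega)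
      set e := pvAdvance cs (k + 1) with he_def
      have hrun : ∀ i, k ≤ i → i < e → digAt cs i = true := by
        intro i h1 h2
        rcases Nat.eq_or_lt_of_le h1 with rfl | h3
        · exact hdig
        · exact pvAdvance_digits cs (k + 1) i h3 h2
      have hstop : digAt cs e = false := by
        rcases Nat.eq_or_lt_of_le helen with heq | hlt2
        · exact digAt_oob cs e (by omega)
        · exact pvAdvance_stop cs (k + 1) hlt2
      have hleft : k = 0 ∨ digAt cs (k - 1) = false := by
        rcases hinv with h | h | h | h
        · exact Or.inl h
        · exact Or.inr h
        · rw [h] at hdig; cases hdig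
        · omega
      have hIH := rowNums_eq cs ((lo' : Int)) ((hi' : Int)) lo' hi' rfl rfl hwin hb e
        (Or.inr (Or.inr (Or.inl hstop)))
      rw [rowNums, dif_pos hk, if_pos hd]
      simp only []
      rw [hIH]
      by_cases hcase1 : hi' < k
      · rw [if_neg (by push_neg; intro hcontra; omega)]
        rw [repsFrom_oob cs lo' hi' (max lo' e) (by omega),
          repsFrom_oob cs lo' hi' (max lo' k) (by omega)]
        rfl
      · by_cases hcase2 : e ≤ lo'
        · rw [if_neg (by push_neg; intro hcontra; omega)]
          have h1 : max lo' e = lo' := by omega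
          have h2 : max lo' k = lo' := by omega
          rw [h1, h2]
          rfl
        · have hcond : (k : Int) ≤ (hi' : Int) ∧ (lo' : Int) ≤ (e : Int) - 1 := by
            constructor <;> omega
          rw [if_pos hcond]
          have hmle : lo' ≤ max lo' k ∧ k ≤ max lo' k ∧ max lo' k ≤ hi' ∧ max lo' k < e := by
            refine ⟨le_max_left _ _, le_max_right _ _, by omega, by omega⟩
          rw [repsFrom_cons cs lo' hi' (max lo' k) (by omega)]
          have hrepm : repF cs lo' (max lo' k) = some (numAt cs (max lo' k)) := by
            unfold repF
            rw [if_pos]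
            refine ⟨hrun _ (by omega) (by omega), ?_⟩
            by_cases hmlo : max lo' k = lo'
            · exact Or.inl hmlo
            · right
              have hmk : max lo' k = k := by omega
              have hk0 : k ≠ 0 := by omega
              rw [hmk]
              rcases hleft with h | h
              · omega
              · exact h
          rw [hrepm]
          have hmaxe : max lo' e = e := by omega
          have hskip : repsFrom cs lo' hi' (max lo' k + 1) = repsFrom cs lo' hi' (max lo' e) := by
            rw [hmaxe]
            refine repsFrom_skip cs lo' hi' (max lo' k + 1) e (by omega) ?_
            intro j h1 h2
            unfold repF
            rw [if_neg]
            rintro ⟨hdj, hcond2 | hcond2⟩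
            · omega
            · have : digAt cs (j - 1) = true := hrun (j - 1) (by omega) (by omega)
              rw [this] at hcond2; cases hcond2
          rw [← hskip]
          have hval := numAt_eq_slice cs k (max lo' k) e (by omega) (by omega) helen hrun hleft hstop
          rw [← he_def, ← hval]
          rfl
    · have hdig : digAt cs k = false := by rw [digAt_lt _ _ hk]; simpa using hd
      have hIH := rowNums_eq cs ((lo' : Int)) ((hi' : Int)) lo' hi' rfl rfl hwin hb (k + 1)
        (Or.inr (Or.inl (by simpa using hdig)))
      rw [rowNums, dif_pos hk, if_neg hd, hIH]
      by_cases hklo : k < lo'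
      · have h1 : max lo' k = lo' := by omega
        have h2 : max lo' (k + 1) = lo' := by omega
        rw [h1, h2]
      · by_cases hkhi : hi' < k
        · rw [repsFrom_oob _ _ _ _ (by omega), repsFrom_oob _ _ _ _ (by omega)]
        · have h1 : max lo' k = k := by omega
          have h2 : max lo' (k + 1) = k + 1 := by omega
          rw [h1, h2, repsFrom_cons cs lo' hi' k (by omega)]
          unfold repF
          rw [if_neg (by rintro ⟨h, _⟩; rw [hdig] at h; cases h)]
          rfl
  · rw [rowNums, dif_neg hk]
    rw [repsFrom_oob cs lo' hi' (max lo' k) (by omega)]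
termination_by cs.length - k
decreasing_by all_goals omega

theorem getNum_eq_numAt (input : List String) (r : Int) (c : Nat)
    (hlen : c < (pvLine input r).length) :
    getNum input r (c : Int) = numAt (pvLine input r) c := by
  unfold getNum numAt
  simp only []
  rw [pyGetD_at (pvLine input r) c hlen]
  have hgd : (pvLine input r).getD c ' ' = (pvLine input r)[c] := by
    rw [List.getD_eq_getElem?_getD, List.getElem?_eq_getElem hlen]
    rfl
  rw [hgd]

theorem colStep_skip (input : List String) (li r : Int) (st : List Int × Int) (col : Int)
    (h : col < 0 ∨ ((pvLine input li).length : Int) ≤ col) :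
    colStep input li r st col = st := by
  unfold colStep
  rw [if_pos h]

theorem colStep_in (input : List String) (li r : Int) (st : List Int × Int) (c : Nat)
    (hW : (c : Int) < ((pvLine input li).length : Int))
    (hr : c < (pvLine input r).length) :
    colStep input li r st (c : Int) =
      (if digAt (pvLine input r) c = true ∧ st.2 = -1 then
        (st.1 ++ [numAt (pvLine input r) c], (c : Int))
       else if digAt (pvLine input r) c = false then (st.1, -1) else st) := by
  unfold colStep
  rw [if_neg (by push_neg; constructor <;> omega)]
  rw [pyGetD_at (pvLine input r) c hr]
  rw [getNum_eq_numAt input r c hr]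
  rw [digAt_lt (pvLine input r) c hr]
  by_cases h1 : PySem.Chars.isdigit (pvLine input r)[c] = true ∧ st.2 = -1
  · rw [if_pos h1, if_pos h1]
  · rw [if_neg h1, if_neg h1]
    by_cases h2 : PySem.Chars.isdigit (pvLine input r)[c]
    · rw [if_neg (by simpa using h2), if_neg (by simp [h2])]
    · rw [if_pos (by simpa using h2), if_pos (by simp [h2])]

theorem foldl_fixed {α β : Type} (f : β → α → β) (l : List α)
    (h : ∀ x ∈ l, ∀ acc, f acc x = acc) : ∀ s, l.foldl f s = s := by
  induction l with
  | nil => intro s; rfl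
  | cons a t ih =>
    intro s
    rw [List.foldl_cons, h a (by simp), ih (fun x hx acc => h x (by simp [hx]) acc)]

theorem foldWin (input : List String) (li r : Int) (lo' hi' : Nat)
    (hW : ((hi' : Int)) < ((pvLine input li).length : Int))
    (hcc : ∀ j : Nat, lo' ≤ j → j ≤ hi' → j < (pvLine input r).length)
    (a : Nat) (ha1 : lo' ≤ a) (ha2 : a ≤ hi' + 1)
    (nums : List Int) (last : Int)
    (hinv : last = -1 ↔ (a = lo' ∨ digAt (pvLine input r) (a - 1) = false)) :
    ((PySem.List.pyRange (a : Int) ((hi' : Int) + 1) 1).foldl (colStep input li r) (nums, last)).1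
      = nums ++ repsFrom (pvLine input r) lo' hi' a := by
  by_cases hend : hi' + 1 ≤ a
  · rw [PySem.List.pyRange_one_eq_nil (by omega)]
    rw [repsFrom_oob _ _ _ _ (by omega)]
    simp
  · have haa : a ≤ hi' := by omega
    rw [PySem.List.pyRange_one_cons (by omega), List.foldl_cons]
    rw [colStep_in input li r (nums, last) a (by omega) (hcc a ha1 haa)]
    have hcast : (a : Int) + 1 = ((a + 1 : Nat) : Int) := by omega
    by_cases hd : digAt (pvLine input r) a = true
    · by_cases hl : last = -1
      · rw [if_pos ⟨hd, hl⟩, hcast]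
        rw [foldWin input li r lo' hi' hW hcc (a + 1) (by omega) (by omega)
          (nums ++ [numAt (pvLine input r) a]) ((a : Int))
          (by
            constructor
            · intro h; omega
            · rintro (h | h)
              · omega
              · rw [Nat.add_sub_cancel] at h; rw [hd] at h; cases h)]
        rw [repsFrom_cons _ _ _ _ haa]
        have hrep : repF (pvLine input r) lo' a = some (numAt (pvLine input r) a) := by
          unfold repF; rw [if_pos ⟨hd, hinv.mp hl⟩]
        rw [hrep]
        simp
      · rw [if_neg (by rintro ⟨_, h⟩; exact hl h), if_neg (by simp [hd]), hcast]
        rw [foldWin input li r lo' hi' hW hcc (a + 1) (by omega) (by omega) nums last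
          (by
            constructor
            · intro h; exact absurd h hl
            · rintro (h | h)
              · omega
              · rw [Nat.add_sub_cancel] at h; rw [hd] at h; cases h)]
        rw [repsFrom_cons _ _ _ _ haa]
        have hrep : repF (pvLine input r) lo' a = none := by
          unfold repF
          rw [if_neg]
          rintro ⟨_, h | h⟩
          · exact hl (hinv.mpr (Or.inl h))
          · exact hl (hinv.mpr (Or.inr h))
        rw [hrep]
        simp
    · rw [if_neg (by rintro ⟨h, _⟩; exact hd h), if_pos (by simpa using hd), hcast]
      rw [foldWin input li r lo' hi' hW hcc (a + 1) (by omega) (by omega) nums (-1)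
        (by
          constructor
          · intro _; right; rw [Nat.add_sub_cancel]; simpa using hd
          · intro _; rfl)]
      rw [repsFrom_cons _ _ _ _ haa]
      have hrep : repF (pvLine input r) lo' a = none := by
        unfold repF
        rw [if_neg]
        rintro ⟨h, _⟩
        exact hd h
      rw [hrep]
      simp
termination_by hi' + 1 - a

theorem rowStep_skip (input : List String) (li ci r : Int) (st : List Int × Int)
    (h : r < 0 ∨ (input.length : Int) ≤ r) :
    rowStep input li ci st r = st := by
  unfold rowStep
  rw [if_pos h]

theorem rowStep_valid (input : List String) (li ci r : Int) (nums : List Int)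
    (lo' hi' : Nat) (hwin : lo' ≤ hi')
    (hvalid : ¬(r < 0 ∨ (input.length : Int) ≤ r))
    (hlo : (lo' : Int) = max (ci - 1) 0)
    (hhi : (hi' : Int) = min (ci + 1) (((pvLine input li).length : Int) - 1))
    (hcc : ∀ j : Nat, lo' ≤ j → j ≤ hi' → j < (pvLine input r).length) :
    rowStep input li ci (nums, -1) r = (nums ++ repsFrom (pvLine input r) lo' hi' lo', -1) := by
  unfold rowStep
  rw [if_neg hvalid]
  simp only []
  rw [PySem.List.pyRange_one_append (ci - 1) ((lo' : Int)) (ci + 2) (by omega) (by omega)]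
  rw [PySem.List.pyRange_one_append ((lo' : Int)) ((hi' : Int) + 1) (ci + 2) (by omega) (by omega)]
  rw [List.foldl_append, List.foldl_append]
  rw [foldl_fixed _ _ (by
    intro x hx acc
    rw [PySem.List.mem_pyRange_one] at hx
    exact colStep_skip input li r acc x (by omega)) (nums, -1)]
  rw [foldl_fixed _ _ (by
    intro x hx acc
    rw [PySem.List.mem_pyRange_one] at hx
    exact colStep_skip input li r acc x (by omega))]
  rw [Prod.mk.injEq]
  refine ⟨?_, rfl⟩
  rw [foldWin input li r lo' hi' (by omega) hcc lo' (le_refl lo') (by omega) nums (-1)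
    (by simp)]

theorem pyRange3 (a : Int) : PySem.List.pyRange a (a + 3) 1 = [a, a + 1, a + 2] := by
  rw [PySem.List.pyRange_one_cons (by omega), PySem.List.pyRange_one_cons (by omega)]
  have e : a + 1 + 1 = a + 2 := by ring
  rw [e]
  have e2 : a + 3 = (a + 2) + 1 := by ring
  rw [e2, PySem.List.pyRange_one_singleton]

theorem pyRange2 (a : Int) : PySem.List.pyRange a (a + 2) 1 = [a, a + 1] := by
  rw [PySem.List.pyRange_one_cons (by omega)]
  have h : a + 2 = (a + 1) + 1 := by ring
  rw [h, PySem.List.pyRange_one_singleton]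

theorem getSurroundNums_core : ∀ (input : List String) (line_index : Int) (char_index : Int),
    Pre_getSurroundNums input line_index char_index →
    getSurroundNums input line_index char_index = getSurroundNums_alt input line_index char_index := by
  intro input li ci hpre
  have hrows : PySem.List.pyRange (li - 1) (li + 2) 1 = [li - 1, li, li + 1] := by
    have h : li + 2 = (li - 1) + 3 := by ring
    rw [h, pyRange3]
    have e1 : li - 1 + 1 = li := by ring
    have e2 : li - 1 + 2 = li + 1 := by ring
    rw [e1, e2]
  rcases hpre with hE | ⟨h0, hLlt, hccPre⟩
  · -- degenerate line_index: both sides []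
    have hLnn : (0 : Int) ≤ (input.length : Int) := by positivity
    have hE' : li < -1 ∨ (input.length : Int) < li ∨ (input.length : Int) = 0 := by
      rcases hE with h | h | h
      · exact Or.inl h
      · exact Or.inr (Or.inl h)
      · right; right; simp [h]
    have hskip : ∀ r : Int, li - 1 ≤ r → r ≤ li + 1 → r < 0 ∨ (input.length : Int) ≤ r := by
      intro r h1 h2; omega
    unfold getSurroundNums
    rw [hrows]
    simp only [List.foldl_cons, List.foldl_nil]
    rw [rowStep_skip input li ci (li - 1) _ (hskip (li - 1) (by omega) (by omega)),
      rowStep_skip input li ci li _ (hskip li (by omega) (by omega)),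
      rowStep_skip input li ci (li + 1) _ (hskip (li + 1) (by omega) (by omega))]
    unfold getSurroundNums_alt
    simp only []
    rw [if_pos (by omega)]
  · -- 0 ≤ li < len
    by_cases hwin : min (ci + 1) (((pvLine input li).length : Int) - 1) < max (ci - 1) 0
    · -- empty window: every column is skipped
      have hstep : ∀ st : List Int × Int, ∀ r : Int,
          rowStep input li ci (st.1, -1) r = (st.1, -1) := by
        intro st r
        by_cases hv : r < 0 ∨ (input.length : Int) ≤ r
        · exact rowStep_skip input li ci _ _ hv
        · unfold rowStep
          rw [if_neg hv]
          simp only []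
          rw [foldl_fixed _ _ (by
            intro x hx acc
            rw [PySem.List.mem_pyRange_one] at hx
            exact colStep_skip input li r acc x (by omega)) ((st.1, -1) : List Int × Int)]
      unfold getSurroundNums
      rw [hrows]
      simp only [List.foldl_cons, List.foldl_nil]
      rw [show (([], -1) : List Int × Int) = ((([], -1) : List Int × Int).1, -1) from rfl,
        hstep, hstep, hstep]
      unfold getSurroundNums_alt
      simp only []
      rw [if_neg (by omega), if_pos hwin]
    · -- non-empty window
      set W : Int := ((pvLine input li).length : Int) with hW_def
      have hlo0 : (0 : Int) ≤ max (ci - 1) 0 := by omega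
      have hhi0 : (0 : Int) ≤ min (ci + 1) (W - 1) := by omega
      set lo' : Nat := (max (ci - 1) 0).toNat with hlo'_def
      set hi' : Nat := (min (ci + 1) (W - 1)).toNat with hhi'_def
      have hlo : (lo' : Int) = max (ci - 1) 0 := Int.toNat_of_nonneg hlo0
      have hhi : (hi' : Int) = min (ci + 1) (W - 1) := Int.toNat_of_nonneg hhi0
      have hwinN : lo' ≤ hi' := by omega
      have hWpos : 0 < W := by omega
      have hccN : ∀ rr : Int, (rr = li - 1 ∨ rr = li ∨ rr = li + 1) → 0 ≤ rr →
          rr < (input.length : Int) →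
          ∀ j : Nat, lo' ≤ j → j ≤ hi' → j < (pvLine input rr).length := by
        intro rr hrr h1 h2 j hj1 hj2
        have hc3 : (j : Int) = ci - 1 ∨ (j : Int) = ci ∨ (j : Int) = ci + 1 := by omega
        have := hccPre rr (by simp [hrr]) h1 h2 ((j : Int)) (by simp; omega) (by omega)
          (by omega)
        omega
      have hRV : ∀ (nums : List Int) (r : Int), (r = li - 1 ∨ r = li ∨ r = li + 1) →
          ¬(r < 0 ∨ (input.length : Int) ≤ r) →
          rowStep input li ci (nums, -1) r
            = (nums ++ repsFrom (pvLine input r) lo' hi' lo', -1) := by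
        intro nums r hr hv
        exact rowStep_valid input li ci r nums lo' hi' hwinN hv (by omega) (by omega)
          (hccN r hr (by omega) (by omega))
      have hRN : ∀ (r : Int), (r = li - 1 ∨ r = li ∨ r = li + 1) → 0 ≤ r →
          r < (input.length : Int) →
          rowNums (pvLine input r) (max (ci - 1) 0) (min (ci + 1) (W - 1)) 0
            = repsFrom (pvLine input r) lo' hi' lo' := by
        intro r hr h1 h2
        have := rowNums_eq (pvLine input r) (max (ci - 1) 0) (min (ci + 1) (W - 1)) lo' hi'
          (by omega) (by omega) hwinN (hccN r hr h1 h2 hi' hwinN (le_refl hi')) 0 (Or.inl rfl)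
        rw [this]
        have hmax : max lo' 0 = lo' := by omega
        rw [hmax]
      unfold getSurroundNums getSurroundNums_alt
      simp only []
      rw [if_neg (by omega), if_neg hwin]
      rw [hrows]
      simp only [List.foldl_cons, List.foldl_nil]
      by_cases hv1 : 1 ≤ li <;> by_cases hv3 : li + 2 ≤ (input.length : Int)
      · -- rows li-1, li, li+1
        rw [hRV [] (li - 1) (by omega) (by omega)]
        rw [hRV _ li (by omega) (by omega)]
        rw [hRV _ (li + 1) (by omega) (by omega)]
        have hr1 : max (li - 1) 0 = li - 1 := by omega
        have hr2 : min (li + 2) ((input.length : Int)) = li + 2 := by omega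
        rw [hr1, hr2]
        have hpr : PySem.List.pyRange (li - 1) (li + 2) 1 = [li - 1, li, li + 1] := hrows
        rw [hpr]
        simp only [List.foldl_cons, List.foldl_nil]
        rw [hRN (li - 1) (by omega) (by omega) (by omega), hRN li (by omega) (by omega) (by omega),
          hRN (li + 1) (by omega) (by omega) (by omega)]
      · -- rows li-1, li
        rw [hRV [] (li - 1) (by omega) (by omega)]
        rw [hRV _ li (by omega) (by omega)]
        rw [rowStep_skip input li ci (li + 1) _ (by omega)]
        have hr1 : max (li - 1) 0 = li - 1 := by omega
        have hr2 : min (li + 2) ((input.length : Int)) = li + 1 := by omega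
        rw [hr1, hr2]
        have hpr : PySem.List.pyRange (li - 1) (li + 1) 1 = [li - 1, li] := by
          have h : li + 1 = (li - 1) + 2 := by ring
          rw [h, pyRange2]
          have e1 : li - 1 + 1 = li := by ring
          rw [e1]
        rw [hpr]
        simp only [List.foldl_cons, List.foldl_nil]
        rw [hRN (li - 1) (by omega) (by omega) (by omega), hRN li (by omega) (by omega) (by omega)]
      · -- rows li, li+1
        rw [rowStep_skip input li ci (li - 1) _ (by omega)]
        rw [hRV [] li (by omega) (by omega)]
        rw [hRV _ (li + 1) (by omega) (by omega)]
        have hr1 : max (li - 1) 0 = li := by omega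
        have hr2 : min (li + 2) ((input.length : Int)) = li + 2 := by omega
        rw [hr1, hr2]
        have hpr : PySem.List.pyRange li (li + 2) 1 = [li, li + 1] := pyRange2 li
        rw [hpr]
        simp only [List.foldl_cons, List.foldl_nil]
        rw [hRN li (by omega) (by omega) (by omega), hRN (li + 1) (by omega) (by omega) (by omega)]
      · -- row li only
        rw [rowStep_skip input li ci (li - 1) _ (by omega)]
        rw [hRV [] li (by omega) (by omega)]
        rw [rowStep_skip input li ci (li + 1) _ (by omega)]
        have hr1 : max (li - 1) 0 = li := by omega
        have hr2 : min (li + 2) ((input.length : Int)) = li + 1 := by omega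
        rw [hr1, hr2]
        have hpr : PySem.List.pyRange li (li + 1) 1 = [li] := PySem.List.pyRange_one_singleton li
        rw [hpr]
        simp only [List.foldl_cons, List.foldl_nil]
        rw [hRN li (by omega) (by omega) (by omega)]

-- ===== VERDICT (by name: the statement is the Claim_ definition above) =====
theorem getSurroundNums_spec : Claim_equal_getSurroundNums := by
  unfold Claim_equal_getSurroundNums
  intro input line_index char_index _ hpre
  unfold Spec_getSurroundNums
  exact getSurroundNums_core input line_index char_index hpre
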